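-- pv_equiv track=rewrite | github.com/Sydeva/xdiag | cantedAFM/plot_heisenberg_spectrum.py | select_lowest_indices
-- ===== SOURCE A (Python) =====
-- from collections import defaultdict
-- from typing import Dict, List, Sequence, Tuple
--
-- def select_lowest_indices(
--     eigenvalues: Sequence[float],
--     momenta: Sequence[str],
--     allowed_momenta: Sequence[str],
--     n_lowest: int,
-- ) -> List[int]:
--     """Keep the indices of the lowest n eigenvalues for each momentum sector."""
--     grouped_indices: Dict[str, List[int]] = defaultdict(list)
--     allowed = set(allowed_momenta)
--
--     for idx, momentum in enumerate(momenta):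
--         if momentum in allowed:
--             grouped_indices[momentum].append(idx)
--
--     selected: List[int] = []
--     for momentum in allowed_momenta:
--         indices = grouped_indices.get(momentum, [])
--         indices = sorted(indices, key=lambda i: eigenvalues[i])[:n_lowest]
--         selected.extend(indices)
--
--     return selected
-- ===== SOURCE B (Python) =====
-- def select_lowest_indices(eigenvalues, momenta, allowed_momenta, n_lowest):
--     """Keep the indices of the lowest n eigenvalues for each momentum sector.
--
--     Dict-free decomposition: for each requested momentum, scan momenta
--     directly for that sector's indices, sort them by eigenvalue, and emit
--     the first n_lowest.
--     """
--     selected = []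
--     for m in allowed_momenta:
--         group = [i for i, mm in enumerate(momenta) if mm == m]
--         group.sort(key=lambda i: eigenvalues[i])
--         selected.extend(group[:n_lowest])
--     return selected
-- ===== Notes on version B (the rewrite author's own statement) =====
-- stated objective: simpler
-- what changed: Drops the defaultdict grouping pass and the allowed-set entirely: B scans momenta directly per requested sector (one comprehension per momentum in allowed_momenta), sorts that group and emits its first n_lowest.
import Mathlib
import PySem

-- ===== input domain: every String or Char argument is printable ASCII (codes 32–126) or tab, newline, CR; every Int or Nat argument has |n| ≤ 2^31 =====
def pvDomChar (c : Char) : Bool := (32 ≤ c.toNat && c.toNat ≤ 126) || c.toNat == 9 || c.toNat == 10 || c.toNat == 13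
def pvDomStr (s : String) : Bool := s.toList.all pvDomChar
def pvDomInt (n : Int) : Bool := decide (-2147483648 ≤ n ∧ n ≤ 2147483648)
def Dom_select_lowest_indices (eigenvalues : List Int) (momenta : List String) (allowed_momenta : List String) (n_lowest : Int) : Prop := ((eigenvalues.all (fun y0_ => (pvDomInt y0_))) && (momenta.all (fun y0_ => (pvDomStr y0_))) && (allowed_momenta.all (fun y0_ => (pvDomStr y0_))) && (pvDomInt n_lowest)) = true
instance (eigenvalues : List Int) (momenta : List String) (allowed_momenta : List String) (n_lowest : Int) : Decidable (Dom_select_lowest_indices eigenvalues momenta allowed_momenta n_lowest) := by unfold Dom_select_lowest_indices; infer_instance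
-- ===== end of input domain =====

-- ===== PORT A =====
-- Port of A: defaultdict grouping of allowed indices by momentum, then per-momentum sort-and-slice.
-- eigenvalues[i] is in range for every sorted index under Pre_, so the key uses pyGet? with a .getD 0 default.
def select_lowest_indices (eigenvalues : List Int) (momenta : List String) (allowed_momenta : List String) (n_lowest : Int) : List Int :=
  let allowed : PySem.Set String := PySem.Set.ofList allowed_momenta
  let grouped : PySem.Dict String (List Int) :=
    (PySem.List.enumerate momenta).foldl
      (fun d p => if PySem.Set.contains allowed p.2 then d.modify p.2 [] (fun l => l ++ [p.1]) else d)
      PySem.Dict.empty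
  allowed_momenta.foldl
    (fun selected m =>
      selected ++ PySem.List.slice
        (PySem.List.sorted (grouped.getD m []) (fun i => (PySem.List.pyGet? eigenvalues i).getD 0))
        none (some n_lowest))
    []

-- ===== PORT B =====
-- Port of B: no dict, no allowed-set — per requested momentum, scan momenta for its indices directly.
def select_lowest_indices_alt (eigenvalues : List Int) (momenta : List String) (allowed_momenta : List String) (n_lowest : Int) : List Int :=
  allowed_momenta.foldl
    (fun selected m =>
      let group := ((PySem.List.enumerate momenta).filter (fun p => p.2 == m)).map (fun p => p.1)
      let sortedGroup := PySem.List.sorted group (fun i => (PySem.List.pyGet? eigenvalues i).getD 0)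
      selected ++ PySem.List.slice sortedGroup none (some n_lowest))
    []

-- ===== PRECONDITION & SPEC =====
-- Pre_ excludes exactly the inputs where Python A raises IndexError: an index whose momentum
-- is among the allowed momenta but which is out of range for eigenvalues.
def Pre_select_lowest_indices (eigenvalues : List Int) (momenta : List String) (allowed_momenta : List String) (n_lowest : Int) : Prop :=
  ∀ p ∈ PySem.List.enumerate momenta, p.2 ∈ allowed_momenta → p.1 < (eigenvalues.length : Int)
instance (eigenvalues : List Int) (momenta : List String) (allowed_momenta : List String) (n_lowest : Int) : Decidable (Pre_select_lowest_indices eigenvalues momenta allowed_momenta n_lowest) := by unfold Pre_select_lowest_indices; infer_instance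
def pvWitness_select_lowest_indices : List Int × List String × List String × Int := ([3, 1, 2], ["a", "b", "a"], ["a"], 2)
def Spec_select_lowest_indices (eigenvalues : List Int) (momenta : List String) (allowed_momenta : List String) (n_lowest : Int) (out : List Int) : Prop := out = select_lowest_indices_alt eigenvalues momenta allowed_momenta n_lowest
instance (eigenvalues : List Int) (momenta : List String) (allowed_momenta : List String) (n_lowest : Int) (out : List Int) : Decidable (Spec_select_lowest_indices eigenvalues momenta allowed_momenta n_lowest out) := by unfold Spec_select_lowest_indices; infer_instance

-- ===== CLAIM (what is proved, stated in full; the proofs are below) =====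
def Claim_equal_select_lowest_indices : Prop := ∀ (eigenvalues : List Int) (momenta : List String) (allowed_momenta : List String) (n_lowest : Int), Dom_select_lowest_indices eigenvalues momenta allowed_momenta n_lowest → Pre_select_lowest_indices eigenvalues momenta allowed_momenta n_lowest → Spec_select_lowest_indices eigenvalues momenta allowed_momenta n_lowest (select_lowest_indices eigenvalues momenta allowed_momenta n_lowest)

-- ===== LEMMAS AND PROOFS =====

-- A guarded fold is a fold over the filtered list.
theorem pv_foldl_guard_filter {a b : Type} (l : List a) (g : a -> Bool) (f : b -> a -> b) (init : b) :
    l.foldl (fun d p => if g p then f d p else d) init = (l.filter g).foldl f init := by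
  induction l generalizing init with
  | nil => rfl
  | cons x xs ih =>
    by_cases hx : g x = true <;> simp [hx, ih]

-- A's dict group for a momentum that is actually requested is B's direct scan.
theorem pv_group_eq (momenta : List String) (allowed_momenta : List String) (m : String)
    (hm : m ∈ allowed_momenta) :
    (((PySem.List.enumerate momenta).foldl
        (fun (d : PySem.Dict String (List Int)) p =>
          if PySem.Set.contains (PySem.Set.ofList allowed_momenta) p.2 then d.modify p.2 [] (fun l => l ++ [p.1]) else d)
        PySem.Dict.empty).getD m [])
      = ((PySem.List.enumerate momenta).filter (fun p => p.2 == m)).map (fun p => p.1) := by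
  rw [pv_foldl_guard_filter]
  rw [show ((PySem.List.enumerate momenta).filter
        (fun p => PySem.Set.contains (PySem.Set.ofList allowed_momenta) p.2)).foldl
        (fun (d : PySem.Dict String (List Int)) p => d.modify p.2 [] (fun l => l ++ [p.1])) PySem.Dict.empty
      = (((PySem.List.enumerate momenta).filter
        (fun p => PySem.Set.contains (PySem.Set.ofList allowed_momenta) p.2)).map Prod.swap).foldl
        (fun (d : PySem.Dict String (List Int)) p => d.modify p.1 [] (fun l => l ++ [p.2])) PySem.Dict.empty
    from by rw [List.foldl_map]; rfl]
  rw [PySem.Dict.getD_foldl_modify_append]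
  simp only [PySem.Dict.getD_empty, List.nil_append, List.filter_map, List.map_map]
  have hfil : ((PySem.List.enumerate momenta).filter
        (fun p => PySem.Set.contains (PySem.Set.ofList allowed_momenta) p.2)).filter
        (fun p => ((fun q => q.1 == m) ∘ Prod.swap) p)
      = (PySem.List.enumerate momenta).filter (fun p => p.2 == m) := by
    rw [List.filter_filter]
    apply List.filter_congr
    intro p _
    by_cases h : p.2 = m
    · subst h
      simp [Function.comp, Prod.swap, PySem.Set.mem_ofList, hm]
    · simp [Function.comp, Prod.swap, h]
  rw [hfil]
  rfl

-- ===== VERDICT (by name: the statement is the Claim_ definition above) =====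
theorem select_lowest_indices_spec : Claim_equal_select_lowest_indices := by
  intro eigenvalues momenta allowed_momenta n_lowest _ _
  unfold Spec_select_lowest_indices select_lowest_indices select_lowest_indices_alt
  apply PySem.List.foldl_congr_mem
  intro acc m hm
  rw [pv_group_eq momenta allowed_momenta m hm]
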